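/- GENERATED by mk_final_copies.py from the proof of the farm's unit `start_decoder.C6a` (farm:start_decoder.C6a.1: Lemmas.lean) as the
   re-elaboration sweep compiled it — do not edit. -/
import Asan.CheckWalk
import Vorbis.Spec.Units.start_decoder_C6a
import Vorbis.Spec.StartDecoderCarry
import Vorbis.Spec.StartDecoderC7

open X86 X86.User Asan Vorbis Vorbis.Spec Vorbis.Spec.StartDecoder

set_option maxRecDepth 100000
set_option maxHeartbeats 4000000

namespace Vorbis.Spec.start_decoder_C6a

/-- **`InC6Mid` over an allocator call**: from `InC6Mid` at the state `s` before the call (ghost `A`, `Aw = A.1`) and the results of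
`Cur.alloc_call` / `Cur.alloc_fail_any` at the returned state `w` (ghost `A'`): `InC6Mid` at `w`, the struct's fields unchanged. `hlen`: the
bytes of `lengths` are kept (dense: a setup block of `A.1`, from `hkept`; sparse: the temp block). -/
theorem c6a_mid {u₀ : State} {g : Ghost} {i : Nat} {A2 A3 Ai : Arena} {A A' : Arena × List Obj} {lengths : Nat} {pc pc' : Word}
    {s w : State} (h : InC6Mid u₀ g i A2 A3 Ai A.1 A lengths pc s) (hF : Frame u₀ g pc' A' w) (hC : Cur g i A2 A3 Ai A' w)
    (hcb : g.cb w.mem i = g.cb s.mem i) (hkept : AllKept A.1.Blk s.mem w.mem) (hext : A.1.Extends A'.1)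
    (hrbx : w.reg .rbx = s.reg .rbx)
    (hlen : (Block.mk lengths (Codebook.entries s.mem (g.cb s.mem i)).toNat).Kept s.mem w.mem) :
    InC6Mid u₀ g i A2 A3 Ai A.1 A' lengths pc' w ∧ Codebook.SameFields s.mem w.mem (g.cb s.mem i) := by
  have hcbOK := h.cur.ages.cbOK
  have hkI : AllKept Ai.Blk s.mem w.mem := fun B hB => hkept B (hB.mono h.cur.ages.exti)
  have hstruct : (Codebook.block (g.cb s.mem i)).Kept s.mem w.mem := hcbOK.cb_kept (hkI _ hcbOK.F2) i h.cur.lt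
  have e := Codebook.SameFields.of_kept hstruct
  have hlenE := hlen.same
  have hlenI := hlen.inside
  simp only [vblock] at hlenE hlenI
  have hf := h.fresh
  refine ⟨?_, e⟩
  exact
    { frame := hF
      cur := hC
      extw := h.extw
      extw' := hext
      k1 := by rw [hcb]; exact h.k1.frame e
      k2 := by rw [hcb]; exact h.k2.frame e
      rbx := by rw [hrbx]; exact h.rbx
      lenL := by rw [hcb, e.entries]; exact h.lenL.same hlenE hlenI
      fresh := by
        rw [hcb]
        exact ⟨⟨by rw [e.lookup_type]; exact hf.lookup_type, by rw [e.lookup_values]; exact hf.lookup_values,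
          by rw [e.multiplicands]; exact hf.multiplicands⟩, by rw [e.sorted_codewords]; exact hf.sorted_codewords,
          by rw [e.sorted_values]; exact hf.sorted_values⟩ }

/-- **`InC6b` (the dense book, @cut128) from the return of `setup_malloc(f, 4·E)`**, both arms. -/
theorem c6a_build_dense {u₀ : State} {g : Ghost} {i : Nat} {A2 A3 Ai : Arena} {A A' : Arena × List Obj} {lengths : Nat} {pc : Word}
    {s w : State} (h : InC6Mid u₀ g i A2 A3 Ai A.1 A lengths pc s)
    (sparse0 : Codebook.sparse s.mem (g.cb s.mem i) = 0)
    (dl : Since Ai A.1 ⟨Codebook.codeword_lengths s.mem (g.cb s.mem i), (Codebook.entries s.mem (g.cb s.mem i)).toNat⟩)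
    (deq : lengths = Codebook.codeword_lengths s.mem (g.cb s.mem i)) (noTemps : A.1.temps = [])
    (cnt : CNT' s.mem lengths (g.cb s.mem i))
    (hF : Frame u₀ g L.start_decoder.cut128 A' w) (hC : Cur g i A2 A3 Ai A' w)
    (hcb : g.cb w.mem i = g.cb s.mem i) (hkept : AllKept A.1.Blk s.mem w.mem) (hext : A.1.Extends A'.1)
    (htemps : A'.1.temps = A.1.temps) (hrbx : w.reg .rbx = s.reg .rbx)
    (hres : w.reg .rax = 0 ∨ Since A.1 A'.1 ⟨(w.reg .rax).toNat, 4 * (Codebook.entries s.mem (g.cb s.mem i)).toNat⟩) :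
    InC6b u₀ g i A2 A3 Ai A.1 A' lengths w := by
  have hlen : (Block.mk lengths (Codebook.entries s.mem (g.cb s.mem i)).toNat).Kept s.mem w.mem := by
    rw [deq]
    exact hkept _ dl.blk
  obtain ⟨hmid, e⟩ := c6a_mid h hF hC hcb hkept hext hrbx hlen
  have hlenE := hlen.same
  have hlenI := hlen.inside
  simp only [vblock] at hlenE hlenI
  exact
    { mid := hmid
      sparse0 := by rw [hcb, e.sparse]; exact sparse0
      dense_lengths := by rw [hcb, e.codeword_lengths, e.entries]; exact dl
      dense_eq := by rw [hcb, e.codeword_lengths]; exact deq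
      noTemps := by rw [htemps]; exact noTemps
      cnt := by
        rw [hcb]
        unfold CNT' at cnt ⊢
        rw [e.entries, e.sorted_entries, C7.longCount_same hlenE hlenI]
        exact cnt
      res := by rw [hcb, e.entries]; exact hres }

/-- **`InC6c` (the sparse book, @cut130) from the return of `setup_malloc(f, SE)`**, both arms. `setup_malloc` leaves the temp blocks
(`htemps`, `hB`: `rfl` for `pushSetup` and for the unchanged ghost). -/
theorem c6a_build_sparse {u₀ : State} {g : Ghost} {i : Nat} {A2 A3 Ai : Arena} {A A' : Arena × List Obj} {lengths : Nat} {pc : Word}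
    {s w : State} (h : InC6Mid u₀ g i A2 A3 Ai A.1 A lengths pc s)
    (sparse1 : Codebook.sparse s.mem (g.cb s.mem i) = 1)
    (temps : TempsAre A.1 [(lengths, (Codebook.entries s.mem (g.cb s.mem i)).toNat)])
    (cnt : CNT s.mem lengths (g.cb s.mem i))
    (hF : Frame u₀ g L.start_decoder.cut130 A' w) (hC : Cur g i A2 A3 Ai A' w)
    (hcb : g.cb w.mem i = g.cb s.mem i) (hkept : AllKept A.1.Blk s.mem w.mem) (hext : A.1.Extends A'.1)
    (htemps : A'.1.temps = A.1.temps) (hB : A'.1.B = A.1.B) (hrbx : w.reg .rbx = s.reg .rbx)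
    (hlen : (Block.mk lengths (Codebook.entries s.mem (g.cb s.mem i)).toNat).Kept s.mem w.mem)
    (hres : w.reg .rax = 0 ∨ Since A.1 A'.1 ⟨(w.reg .rax).toNat, (Codebook.sorted_entries s.mem (g.cb s.mem i)).toNat⟩) :
    InC6c u₀ g i A2 A3 Ai A.1 A' lengths w := by
  obtain ⟨hmid, e⟩ := c6a_mid h hF hC hcb hkept hext hrbx hlen
  have hlenE := hlen.same
  have hlenI := hlen.inside
  simp only [vblock] at hlenE hlenI
  exact
    { mid := hmid
      sparse1 := by rw [hcb, e.sparse]; exact sparse1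
      temps := by
        rw [hcb, e.entries]
        unfold TempsAre at temps ⊢
        rw [htemps, hB]
        exact temps
      cnt := by
        rw [hcb]
        unfold CNT at cnt ⊢
        rw [e.entries, e.sorted_entries, C7.usedCount_same hlenE hlenI]
        exact cnt
      res := by rw [hcb, e.sorted_entries]; exact hres }

/-- **Where `*f` is** (a stack object of stb_vorbis_open_memory, or an object of `A.2`): in the data space, and off the part of the
stack below the steady stack pointer `R` — what reading a field of `*f` through the function's own pushes needs. -/
theorem c6a_obj_where {g : Ghost} {i : Nat} {A2 A3 Ai : Arena} {A : Arena × List Obj} {v : State} (h : Cur g i A2 A3 Ai A v)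
    (hsh : ShadowInv A.2 g.frames' g.R v.mem) (hoff : ∀ o, o ∈ A.2 → L.textHi ≤ o.base) :
    0x119d40 ≤ g.f ∧ g.f + 1808 ≤ 0xC00000 ∧ (g.R ≤ g.f ∨ g.f + 1808 ≤ 0x700000 ∨ 0x800000 ≤ g.f) := by
  have hl : LiveIn A.2 g.frames' g.f Off.sizeof.stb_vorbis := by
    apply h.hand.obj.mono
    intro o ho
    unfold Ghost.frames'
    rw [stackObjs_cons]
    rcases List.mem_append.mp ho with hs | ho'
    · exact List.mem_append_left _ (List.mem_append_right _ hs)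
    · exact List.mem_append_right _ ho'
  have hw := hl.where_ hsh hoff (by simp only [voff]; omega)
  simp only [voff] at hw
  exact hw

/-- **`setup_malloc`'s precondition at 0x1148ab / 0x1148ee**: the state `s` at the callee's entry has the memory of the cut point but for the pushed
return address below `R` (`hmem`), `rsp = R − 8`, `rdi = f`. -/
theorem c6a_malloc_pre {u₀ : State} {g : Ghost} {i : Nat} {A2 A3 Ai : Arena} {A : Arena × List Obj} {pc : Word} {v s : State}
    (hfr : Frame u₀ g pc A v) (hcur : Cur g i A2 A3 Ai A v) (hun : ShadowUntouched v.mem s.mem)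
    (hmem : Mem.EqOn (g.f + 112) (g.f + 136) v.mem s.mem) (hrsp : (s.reg .rsp).toNat + 8 = g.R)
    (hrdi : (s.reg .rdi).toNat = g.f) : (setup_malloc.spec A.2 g.frames' A.1).pre s := by
  have hob := hcur.sd.bits.OB1
  obtain ⟨hf1, hf2, _⟩ := c6a_obj_where hcur hfr.shadow hfr.offText
  refine ⟨⟨?_, hfr.offText⟩, ?_, ?_, hcur.hand.arenaText⟩
  · rw [hrsp]
    exact hfr.shadow.untouched hun
  · rw [hrdi]
    exact hcur.sd.env.live _ hob
  · rw [hrdi]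
    apply hcur.sd.arena.frame (by simp only [voff]; omega)
    simp only [voff]
    exact hmem

/-- The walker's form of `lea esi, [rax*4]` for a value below 2^30. -/
theorem c6a_lea4 (x : BitVec 32) (h : x.toNat < 2 ^ 30) :
    (Word.ofBV (BitVec.setWidth 32 (Word.ofBV x * 4).toBitVec)).toNat = 4 * x.toNat := by
  have e4 : (4 : Word).toNat = 4 := rfl
  rw [toNat_ofBV32, BitVec.toNat_setWidth, UInt64.toNat_toBitVec, UInt64.toNat_mul, toNat_ofBV32, e4]
  omega

end Vorbis.Spec.start_decoder_C6a
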